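-- pv_equiv track=rewrite | github.com/Wilkerson/Prometheus | apps/web/views.py | _validar_endereco
-- ===== SOURCE A (Python) =====
-- def _validar_endereco(post_data):
--     """Valida campos de endereco. Retorna (dados_endereco, erros)."""
--     erros = {}
--     dados = {}
--
--     cep = post_data.get("cep", "").strip()
--     if not cep:
--         erros["cep"] = "O CEP e obrigatorio."
--     else:
--         digits = "".join(c for c in cep if c.isdigit())
--         if len(digits) != 8:
--             erros["cep"] = "CEP deve conter 8 digitos."
--     dados["cep"] = cep
--
--     logradouro = post_data.get("logradouro", "").strip()
--     if not logradouro: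
--         erros["logradouro"] = "O logradouro e obrigatorio."
--     dados["logradouro"] = logradouro
--
--     numero = post_data.get("numero", "").strip()
--     if not numero:
--         erros["numero"] = "O numero e obrigatorio."
--     dados["numero"] = numero
--
--     dados["complemento"] = post_data.get("complemento", "").strip()
--
--     bairro = post_data.get("bairro", "").strip()
--     if not bairro:
--         erros["bairro"] = "O bairro e obrigatorio."
--     dados["bairro"] = bairro
--
--     cidade = post_data.get("cidade", "").strip()
--     if not cidade:
--         erros["cidade"] = "A cidade e obrigatoria."
--     dados["cidade"] = cidade
--
--     uf = post_data.get("uf", "").strip().upper()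
--     if not uf:
--         erros["uf"] = "O UF e obrigatorio."
--     dados["uf"] = uf
--
--     return dados, erros
-- ===== SOURCE B (Python) =====
-- _FIELD_SPECS = [
--     ("cep", "O CEP e obrigatorio."),
--     ("logradouro", "O logradouro e obrigatorio."),
--     ("numero", "O numero e obrigatorio."),
--     ("complemento", None),
--     ("bairro", "O bairro e obrigatorio."),
--     ("cidade", "A cidade e obrigatoria."),
--     ("uf", "O UF e obrigatorio."),
-- ]
--
--
-- def _validar_endereco(post_data):
--     """Valida campos de endereco. Retorna (dados_endereco, erros)."""
--     dados = {}
--     erros = {}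
--     for key, required_msg in _FIELD_SPECS:
--         val = post_data.get(key, "").strip()
--         if key == "uf":
--             val = val.upper()
--         dados[key] = val
--         if required_msg is None:
--             continue
--         if not val:
--             erros[key] = required_msg
--         elif key == "cep" and sum(c.isdigit() for c in val) != 8:
--             erros[key] = "CEP deve conter 8 digitos."
--     return dados, erros
-- ===== Notes on version B (the rewrite author's own statement) =====
-- stated objective: simpler
-- what changed: Replaced six copy-pasted per-field validation blocks by a single data-driven loop over a field-specification table (key, required-message-or-None), with the uf uppercase transform and the cep digit-count check folded into the loop body.
import Mathlib
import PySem

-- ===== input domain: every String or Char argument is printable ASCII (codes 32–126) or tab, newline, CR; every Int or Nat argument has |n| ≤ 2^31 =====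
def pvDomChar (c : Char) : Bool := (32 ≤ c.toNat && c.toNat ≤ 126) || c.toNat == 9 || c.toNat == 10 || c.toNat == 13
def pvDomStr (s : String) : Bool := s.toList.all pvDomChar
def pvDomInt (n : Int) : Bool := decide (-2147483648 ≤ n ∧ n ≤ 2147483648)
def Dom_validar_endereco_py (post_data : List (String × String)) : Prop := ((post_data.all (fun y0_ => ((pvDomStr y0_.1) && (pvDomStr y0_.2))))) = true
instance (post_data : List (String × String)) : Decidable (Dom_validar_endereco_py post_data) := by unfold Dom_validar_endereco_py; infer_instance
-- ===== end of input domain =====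

-- B replaces A's six copy-pasted per-field blocks by one loop over a field-specification table (simpler).

-- ===== PORT A =====
-- straight-line transliteration of A; '"".join(c for c in cep if c.isdigit())' followed by len(...)
-- is ported exactly as the filtered char list and its length.
def validar_endereco_py (post_data : List (String × String)) : (List (String × String)) × (List (String × String)) :=
  let pd := PySem.Dict.ofList post_data
  let erros : PySem.Dict String String := PySem.Dict.empty
  let dados : PySem.Dict String String := PySem.Dict.empty
  let cep := PySem.Str.strip (pd.getD "cep" "")
  let erros :=
    if cep = "" then erros.insert "cep" "O CEP e obrigatorio."
    else
      let digits := cep.toList.filter PySem.Chars.isdigit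
      if digits.length ≠ 8 then erros.insert "cep" "CEP deve conter 8 digitos." else erros
  let dados := dados.insert "cep" cep
  let logradouro := PySem.Str.strip (pd.getD "logradouro" "")
  let erros := if logradouro = "" then erros.insert "logradouro" "O logradouro e obrigatorio." else erros
  let dados := dados.insert "logradouro" logradouro
  let numero := PySem.Str.strip (pd.getD "numero" "")
  let erros := if numero = "" then erros.insert "numero" "O numero e obrigatorio." else erros
  let dados := dados.insert "numero" numero
  let dados := dados.insert "complemento" (PySem.Str.strip (pd.getD "complemento" ""))
  let bairro := PySem.Str.strip (pd.getD "bairro" "")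
  let erros := if bairro = "" then erros.insert "bairro" "O bairro e obrigatorio." else erros
  let dados := dados.insert "bairro" bairro
  let cidade := PySem.Str.strip (pd.getD "cidade" "")
  let erros := if cidade = "" then erros.insert "cidade" "A cidade e obrigatoria." else erros
  let dados := dados.insert "cidade" cidade
  let uf := PySem.Str.upper (PySem.Str.strip (pd.getD "uf" ""))
  let erros := if uf = "" then erros.insert "uf" "O UF e obrigatorio." else erros
  let dados := dados.insert "uf" uf
  (dados.items, erros.items)

-- ===== PORT B =====
def pvFieldSpecs : List (String × Option String) :=
  [("cep", some "O CEP e obrigatorio."),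
   ("logradouro", some "O logradouro e obrigatorio."),
   ("numero", some "O numero e obrigatorio."),
   ("complemento", none),
   ("bairro", some "O bairro e obrigatorio."),
   ("cidade", some "A cidade e obrigatoria."),
   ("uf", some "O UF e obrigatorio.")]

-- transliteration of Source B: one fold over the spec table; 'sum(c.isdigit() for c in val)' is countP isdigit.
def validar_endereco_py_alt (post_data : List (String × String)) : (List (String × String)) × (List (String × String)) :=
  let pd := PySem.Dict.ofList post_data
  let out := pvFieldSpecs.foldl
    (fun (acc : PySem.Dict String String × PySem.Dict String String) spec =>
      let key := spec.1
      let val0 := PySem.Str.strip (pd.getD key "")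
      let val := if key = "uf" then PySem.Str.upper val0 else val0
      let dados := acc.1.insert key val
      let erros :=
        match spec.2 with
        | none => acc.2
        | some msg =>
          if val = "" then acc.2.insert key msg
          else if key = "cep" ∧ val.toList.countP PySem.Chars.isdigit ≠ 8 then
            acc.2.insert key "CEP deve conter 8 digitos."
          else acc.2
      (dados, erros))
    (PySem.Dict.empty, PySem.Dict.empty)
  (out.1.items, out.2.items)

-- ===== PRECONDITION & SPEC =====
def Spec_validar_endereco_py (post_data : List (String × String)) (out : (List (String × String)) × (List (String × String))) : Prop := out = validar_endereco_py_alt post_data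
instance (post_data : List (String × String)) (out : (List (String × String)) × (List (String × String))) : Decidable (Spec_validar_endereco_py post_data out) := by unfold Spec_validar_endereco_py; infer_instance

-- ===== CLAIM (what is proved, stated in full; the proofs are below) =====
def Claim_equal_validar_endereco_py : Prop := ∀ (post_data : List (String × String)), Dom_validar_endereco_py post_data → Spec_validar_endereco_py post_data (validar_endereco_py post_data)

-- ===== LEMMAS AND PROOFS =====

-- ===== VERDICT (by name: the statement is the Claim_ definition above) =====
set_option maxHeartbeats 2000000 in
theorem validar_endereco_py_spec : Claim_equal_validar_endereco_py := by
  intro post_data _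
  unfold Spec_validar_endereco_py validar_endereco_py validar_endereco_py_alt pvFieldSpecs
  simp only [List.foldl, List.countP_eq_length_filter, reduceIte]
  generalize PySem.Str.upper (PySem.Str.strip ((PySem.Dict.ofList post_data).getD "uf" "")) = u
  generalize PySem.Str.strip ((PySem.Dict.ofList post_data).getD "cep" "") = c
  generalize PySem.Str.strip ((PySem.Dict.ofList post_data).getD "logradouro" "") = l
  generalize PySem.Str.strip ((PySem.Dict.ofList post_data).getD "numero" "") = n
  generalize PySem.Str.strip ((PySem.Dict.ofList post_data).getD "complemento" "") = co
  generalize PySem.Str.strip ((PySem.Dict.ofList post_data).getD "bairro" "") = b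
  generalize PySem.Str.strip ((PySem.Dict.ofList post_data).getD "cidade" "") = ci
  simp only [String.reduceEq, true_and, false_and, if_false]
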